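-- pv_equiv track=rewrite | github.com/ybjiaang/IdeRepUnknownInt | misc.py | not_maximal
-- ===== SOURCE A (Python) =====
-- def exist_superset(canidate_set, list_sets, proper = True):
--     supersets = []
--     for one_set in list_sets:
--         if proper:
--             if set(canidate_set) < set(one_set):
--                 supersets.append(list(one_set))
--         else:
--             if set(canidate_set) <= set(one_set):
--                 supersets.append(list(one_set))
--     return supersets
--
-- def not_maximal(candidate_set, list_valid_subsets, set_all_maximal_cliques):
--     # check if a subset of another set
--     supersets = exist_superset(candidate_set, list_valid_subsets)
--     if len(supersets) == 0:
--         return False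
--
--     for superset in supersets:
--         exist_flag = True
--         for max_cliq in set_all_maximal_cliques:
--             if set(candidate_set) <= set(max_cliq) and not (set(superset) <= set(max_cliq)):
--                 exist_flag = False
--                 break
--         if exist_flag:
--             return True
--     return False
-- ===== SOURCE B (Python) =====
-- def not_maximal(candidate_set, list_valid_subsets, set_all_maximal_cliques):
--     # Intersect all maximal cliques containing the candidate into one "core" set;
--     # a proper superset is acceptable iff it fits inside that core (no core => no constraint).
--     cand = set(candidate_set)
--     core = None
--     for mc in set_all_maximal_cliques:
--         m = set(mc)
--         if cand <= m:
--             core = m if core is None else core & m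
--     for s in list_valid_subsets:
--         ss = set(s)
--         if cand < ss and (core is None or ss <= core):
--             return True
--     return False
-- ===== Notes on version B (the rewrite author's own statement) =====
-- stated objective: faster
-- what changed: B replaces A's nested subset-x-clique loop by a two-pass intersection algorithm: it folds all candidate-containing maximal cliques into one core set (their intersection, or None if there are none) and then accepts any proper superset that fits inside the core.
import Mathlib
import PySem

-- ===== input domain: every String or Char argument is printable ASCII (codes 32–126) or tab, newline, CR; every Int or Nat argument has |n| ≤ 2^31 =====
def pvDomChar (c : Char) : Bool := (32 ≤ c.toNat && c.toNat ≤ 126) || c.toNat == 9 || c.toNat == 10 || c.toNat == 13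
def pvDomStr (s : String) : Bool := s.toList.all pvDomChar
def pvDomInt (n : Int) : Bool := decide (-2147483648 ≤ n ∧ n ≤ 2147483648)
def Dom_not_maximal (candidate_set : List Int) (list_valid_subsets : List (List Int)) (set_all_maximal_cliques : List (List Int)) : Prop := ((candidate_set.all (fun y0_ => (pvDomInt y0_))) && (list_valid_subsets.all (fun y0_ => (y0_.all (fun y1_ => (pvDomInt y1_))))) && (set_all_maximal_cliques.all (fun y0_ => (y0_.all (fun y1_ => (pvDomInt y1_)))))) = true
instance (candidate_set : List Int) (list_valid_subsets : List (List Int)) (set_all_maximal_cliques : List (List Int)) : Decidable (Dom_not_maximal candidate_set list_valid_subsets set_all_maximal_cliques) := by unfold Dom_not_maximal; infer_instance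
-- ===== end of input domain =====

-- B intersects all candidate-containing cliques into one core set and tests each superset against it, removing the nested clique loop; same result.
-- ===== PORT A =====
-- set(a) <= set(b)
def pySubset (a b : List Int) : Bool := a.all (fun x => b.contains x)
-- set(a) < set(b)
def pyPropSubset (a b : List Int) : Bool := pySubset a b && !pySubset b a
def exist_superset (canidate_set : List Int) (list_sets : List (List Int)) (proper : Bool) : List (List Int) :=
  list_sets.foldl (fun supersets one_set =>
    if proper then
      (if pyPropSubset canidate_set one_set then supersets ++ [one_set] else supersets)
    else
      (if pySubset canidate_set one_set then supersets ++ [one_set] else supersets)) []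

def not_maximal (candidate_set : List Int) (list_valid_subsets : List (List Int)) (set_all_maximal_cliques : List (List Int)) : Bool :=
  let supersets := exist_superset candidate_set list_valid_subsets true
  if supersets.length = 0 then false
  else
    -- outer loop with early return True; inner loop with exist_flag/break = all cliques pass
    supersets.any (fun superset =>
      set_all_maximal_cliques.all (fun max_cliq =>
        !(pySubset candidate_set max_cliq && !pySubset superset max_cliq)))

-- ===== PORT B =====
-- cand <= set(b) on Int sets
def bSub (a b : List Int) : Bool := a.all (fun x => decide (x ∈ b))
-- the core-building loop: None = no candidate-containing clique seen, Some c = intersection so far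
def coreFold (cand : List Int) (mcs : List (List Int)) : Option (List Int) :=
  mcs.foldl (fun core mc =>
    if bSub cand mc then
      some (match core with
            | none => mc
            | some c => c.filter (fun x => decide (x ∈ mc)))
    else core) none

def not_maximal_alt (candidate_set : List Int) (list_valid_subsets : List (List Int)) (set_all_maximal_cliques : List (List Int)) : Bool :=
  let core := coreFold candidate_set set_all_maximal_cliques
  list_valid_subsets.any (fun s =>
    (bSub candidate_set s && !bSub s candidate_set) &&
    (match core with
     | none => true
     | some c => bSub s c))

-- ===== PRECONDITION & SPEC =====
def Spec_not_maximal (candidate_set : List Int) (list_valid_subsets : List (List Int)) (set_all_maximal_cliques : List (List Int)) (out : Bool) : Prop := out = not_maximal_alt candidate_set list_valid_subsets set_all_maximal_cliques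
instance (candidate_set : List Int) (list_valid_subsets : List (List Int)) (set_all_maximal_cliques : List (List Int)) (out : Bool) : Decidable (Spec_not_maximal candidate_set list_valid_subsets set_all_maximal_cliques out) := by unfold Spec_not_maximal; infer_instance

-- ===== CLAIM (what is proved, stated in full; the proofs are below) =====
def Claim_equal_not_maximal : Prop := ∀ (candidate_set : List Int) (list_valid_subsets : List (List Int)) (set_all_maximal_cliques : List (List Int)), Dom_not_maximal candidate_set list_valid_subsets set_all_maximal_cliques → Spec_not_maximal candidate_set list_valid_subsets set_all_maximal_cliques (not_maximal candidate_set list_valid_subsets set_all_maximal_cliques)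

-- ===== LEMMAS AND PROOFS =====
theorem bSub_eq_pySubset (a b : List Int) : bSub a b = pySubset a b := by
  simp [bSub, pySubset]

-- "s fits the core" for a given accumulator value
def chkCore (s : List Int) : Option (List Int) → Bool
  | none => true
  | some c => bSub s c

theorem bSub_filter (s c mc : List Int) :
    bSub s (c.filter (fun x => decide (x ∈ mc))) = (bSub s c && bSub s mc) := by
  induction s with
  | nil => rfl
  | cons x t ih =>
    simp only [bSub, List.all_cons, List.mem_filter, decide_eq_true_eq] at *
    rw [ih]
    by_cases h1 : x ∈ c <;> by_cases h2 : x ∈ mc <;> simp [h1, h2]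

-- the core intersection encodes the "all relevant cliques contain s" test
theorem chkCore_fold (cand s : List Int) (mcs : List (List Int)) (core : Option (List Int)) :
    chkCore s (mcs.foldl (fun core mc =>
      if bSub cand mc then
        some (match core with
              | none => mc
              | some c => c.filter (fun x => decide (x ∈ mc)))
      else core) core)
    = (chkCore s core && mcs.all (fun mc => !bSub cand mc || bSub s mc)) := by
  induction mcs generalizing core with
  | nil => simp
  | cons mc rest ih =>
    simp only [List.foldl_cons, List.all_cons]
    by_cases h : bSub cand mc = true
    · rw [if_pos h, ih]
      cases core with
      | none => simp [chkCore, h]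
      | some c => simp [chkCore, h, bSub_filter, Bool.and_assoc]
    · rw [if_neg h, ih]
      simp [Bool.not_eq_true] at h
      simp [h]

-- ===== VERDICT (by name: the statement is the Claim_ definition above) =====
theorem not_maximal_spec : Claim_equal_not_maximal := by
  intro cand lvs samc _
  unfold Spec_not_maximal not_maximal not_maximal_alt exist_superset coreFold
  simp only [if_true, PySem.List.foldl_append_if_eq_filter, List.nil_append, bSub_eq_pySubset]
  have hIf : ∀ (l : List (List Int)) (q : List Int → Bool),
      (if l.length = 0 then false else l.any q) = l.any q := by
    intro l q; cases l <;> simp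
  rw [hIf, List.any_filter]
  congr 1
  funext s
  by_cases hp : pyPropSubset cand s = true
  · simp only [hp, Bool.true_and]
    have hp' : (pySubset cand s && !pySubset s cand) = true := hp
    rw [hp', Bool.true_and]
    have := chkCore_fold cand s samc none
    simp only [bSub_eq_pySubset] at this
    rw [show (match (samc.foldl (fun core mc =>
        if pySubset cand mc then
          some (match core with
                | none => mc
                | some c => c.filter (fun x => decide (x ∈ mc)))
        else core) none) with
        | none => true
        | some c => pySubset s c) = chkCore s (samc.foldl (fun core mc =>
        if pySubset cand mc then
          some (match core with
                | none => mc
                | some c => c.filter (fun x => decide (x ∈ mc)))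
        else core) none) from by
      cases h : (samc.foldl (fun core mc =>
        if pySubset cand mc then
          some (match core with
                | none => mc
                | some c => c.filter (fun x => decide (x ∈ mc)))
        else core) none) <;> simp [chkCore, bSub_eq_pySubset]]
    rw [this]
    simp only [chkCore, Bool.true_and]
    congr 1
    funext mc
    cases hc : pySubset cand mc <;> cases hm : pySubset s mc <;> simp
  · simp only [Bool.not_eq_true] at hp
    have hp' : (pySubset cand s && !pySubset s cand) = false := hp
    simp only [pyPropSubset, hp', Bool.false_and]
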